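-- pv_equiv track=rewrite | github.com/bluelife79/Nutricionista | scripts/test_intercambios.py | find_food
-- ===== SOURCE A (Python) =====
-- def find_food(foods: list, name: str) -> dict:
--     """Busca un alimento por nombre exacto (case-insensitive)."""
--     nl = name.lower()
--     for f in foods:
--         if (f.get("name") or "").lower() == nl:
--             return f
--     # fallback: substring match
--     for f in foods:
--         if nl in (f.get("name") or "").lower():
--             return f
--     return None
-- ===== SOURCE B (Python) =====
-- def find_food(foods: list, name: str) -> dict:
--     """Busca un alimento por nombre (exacto case-insensitive, luego substring) en un solo recorrido."""
--     nl = name.lower()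
--     fallback = None
--     for f in foods:
--         ln = (f.get("name") or "").lower()
--         if ln == nl:
--             return f
--         if fallback is None and nl in ln:
--             fallback = f
--     return fallback
-- ===== Notes on version B (the rewrite author's own statement) =====
-- stated objective: simpler
-- what changed: The two sequential scans (exact match, then substring fallback) are fused into one loop that records the first substring match while still returning an exact match immediately.
import Mathlib
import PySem

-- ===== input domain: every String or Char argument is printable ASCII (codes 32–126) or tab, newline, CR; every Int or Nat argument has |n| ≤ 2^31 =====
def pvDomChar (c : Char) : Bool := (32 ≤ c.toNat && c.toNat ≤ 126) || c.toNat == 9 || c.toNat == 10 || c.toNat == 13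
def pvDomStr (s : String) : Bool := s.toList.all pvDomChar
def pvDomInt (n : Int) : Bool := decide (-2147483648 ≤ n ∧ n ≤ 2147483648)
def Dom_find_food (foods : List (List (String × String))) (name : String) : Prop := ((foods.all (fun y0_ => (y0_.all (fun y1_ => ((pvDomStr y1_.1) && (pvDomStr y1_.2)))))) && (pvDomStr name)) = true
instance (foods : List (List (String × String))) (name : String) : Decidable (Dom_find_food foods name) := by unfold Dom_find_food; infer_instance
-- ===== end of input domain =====

-- ===== PORT A =====
-- one honest line: B fuses A's two scans into a single loop carrying the first substring match; same return value.
-- '(f.get("name") or "")': the values are strings, so 'or ""' only replaces a missing/empty name by "" — getD "" is exact.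
def pvNameOf (f : List (String × String)) : String :=
  (PySem.Dict.get? (PySem.Dict.mk f) "name").getD ""

-- first loop of A: first exact (lower-cased) match
def pvLoopExact (nl : String) : List (List (String × String)) → Option (List (String × String))
  | [] => none
  | f :: rest =>
      if PySem.Str.lower (pvNameOf f) == nl then some f
      else pvLoopExact nl rest

-- second loop of A: first substring match
def pvLoopSub (nl : String) : List (List (String × String)) → Option (List (String × String))
  | [] => none
  | f :: rest =>
      if PySem.Str.isIn nl (PySem.Str.lower (pvNameOf f)) then some f
      else pvLoopSub nl rest

def find_food (foods : List (List (String × String))) (name : String) : Option (List (String × String)) :=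
  let nl := PySem.Str.lower name
  match pvLoopExact nl foods with
  | some f => some f
  | none => pvLoopSub nl foods

-- ===== PORT B =====
-- single pass: return on exact match, remember the first substring match in 'fallback'
def pvAltLoop (nl : String) : List (List (String × String)) → Option (List (String × String)) → Option (List (String × String))
  | [], fallback => fallback
  | f :: rest, fallback =>
      let ln := PySem.Str.lower (pvNameOf f)
      if ln == nl then some f
      else if fallback.isNone && PySem.Str.isIn nl ln then pvAltLoop nl rest (some f)
      else pvAltLoop nl rest fallback

def find_food_alt (foods : List (List (String × String))) (name : String) : Option (List (String × String)) :=
  pvAltLoop (PySem.Str.lower name) foods none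

-- ===== PRECONDITION & SPEC =====
def Spec_find_food (foods : List (List (String × String))) (name : String) (out : Option (List (String × String))) : Prop := out = find_food_alt foods name
instance (foods : List (List (String × String))) (name : String) (out : Option (List (String × String))) : Decidable (Spec_find_food foods name out) := by unfold Spec_find_food; infer_instance

-- ===== CLAIM (what is proved, stated in full; the proofs are below) =====
def Claim_equal_find_food : Prop := ∀ (foods : List (List (String × String))) (name : String), Dom_find_food foods name → Spec_find_food foods name (find_food foods name)

-- ===== LEMMAS AND PROOFS =====

-- ===== VERDICT (by name: the statement is the Claim_ definition above) =====
-- Loop invariant: B's single pass equals "exact match, else the stored fallback, else substring match".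
theorem pvAltLoop_eq (nl : String) (foods : List (List (String × String)))
    (fb : Option (List (String × String))) :
    pvAltLoop nl foods fb =
      ((pvLoopExact nl foods).orElse (fun _ => fb.orElse (fun _ => pvLoopSub nl foods))) := by
  induction foods generalizing fb with
  | nil => cases fb <;> simp [pvAltLoop, pvLoopExact, pvLoopSub]
  | cons f rest ih =>
      simp only [pvAltLoop, pvLoopExact, pvLoopSub]
      by_cases he : PySem.Str.lower (pvNameOf f) == nl
      · simp [he]
      · simp only [he]
        cases fb with
        | some x =>
            simp only [Option.isNone_some, Bool.false_and, ih]
            cases pvLoopExact nl rest <;> simp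
        | none =>
            by_cases hs : PySem.Str.isIn nl (PySem.Str.lower (pvNameOf f))
            · simp only [Option.isNone_none, Bool.true_and, hs, if_true, ih]
              cases pvLoopExact nl rest <;> simp
            · simp only [hs, Bool.and_false, ih]
              cases pvLoopExact nl rest <;> simp

theorem find_food_spec : Claim_equal_find_food := by
  intro foods name _
  unfold Spec_find_food find_food find_food_alt
  rw [pvAltLoop_eq]
  cases h : pvLoopExact (PySem.Str.lower name) foods <;> simp [h]
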